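-- pv_equiv track=rewrite | github.com/ToheedAsghar/ProblemSolving | 1914A-ProblemSolvingLog.py | solve
-- ===== SOURCE A (Python) =====
-- def solve(arr, n):
--     dict = {}
--     for i in arr:
--         dict[i] = dict.get(i, 0) + 1
--
--     cnt = 0
--     for key,value in dict.items():
--         if key in dict and dict[key] >= (ord(key) - 65) + 1:
--             cnt += 1
--
--     return cnt
-- ===== SOURCE B (Python) =====
-- def solve(arr, n):
--     cnt = 0
--     rest = arr
--     while rest:
--         c = rest[0]
--         new = [x for x in rest if x != c]
--         if len(rest) - len(new) >= ord(c) - 64: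
--             cnt += 1
--         rest = new
--     return cnt
-- ===== Notes on version B (the rewrite author's own statement) =====
-- stated objective: alternative
-- what changed: Replaces the frequency-dictionary build plus items loop by a partition-and-shrink loop: repeatedly take the first remaining element, filter out all its copies, and derive its multiplicity as the length drop, so no dict or counting structure exists at all.
import Mathlib
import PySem

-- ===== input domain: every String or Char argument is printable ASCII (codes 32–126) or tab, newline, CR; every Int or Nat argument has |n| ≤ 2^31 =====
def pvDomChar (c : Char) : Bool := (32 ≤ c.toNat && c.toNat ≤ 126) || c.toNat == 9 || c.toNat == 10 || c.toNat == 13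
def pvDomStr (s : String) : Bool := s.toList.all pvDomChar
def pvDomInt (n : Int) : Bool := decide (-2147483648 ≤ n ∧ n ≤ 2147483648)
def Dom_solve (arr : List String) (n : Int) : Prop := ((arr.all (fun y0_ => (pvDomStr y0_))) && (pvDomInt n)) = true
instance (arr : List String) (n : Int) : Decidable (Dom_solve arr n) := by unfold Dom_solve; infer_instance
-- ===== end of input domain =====

-- B replaces A's frequency dictionary by a partition-and-shrink loop with no counting
-- structure at all: take the first remaining element, filter out all its copies, and read
-- its multiplicity off the length drop (alternative algorithm; return value equivalence).

-- ord(s) for a length-1 string (Pre_ guarantees length 1, where this is exact)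
def pyOrd (s : String) : Int := ((s.toList.headD 'A').toNat : Int)

-- ===== PORT A =====
def solve (arr : List String) (n : Int) : Int :=
  let d := arr.foldl (fun d i => d.insert i (d.getD i 0 + 1)) (PySem.Dict.empty : PySem.Dict String Int)
  d.items.foldl (fun cnt kv =>
    if d.contains kv.1 && decide (((d.get? kv.1).getD 0 : Int) ≥ (pyOrd kv.1 - 65) + 1)
    then cnt + 1 else cnt) 0

-- ===== PORT B =====
-- the while loop of Source B: state (rest, cnt)
def solveAltLoop (rest : List String) (cnt : Int) : Int :=
  match rest with
  | [] => cnt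
  | c :: t =>
    let new := (c :: t).filter (fun x => x ≠ c)
    solveAltLoop new
      (if ((c :: t).length : Int) - (new.length : Int) ≥ pyOrd c - 64 then cnt + 1 else cnt)
termination_by rest.length
decreasing_by
  have h := List.length_filter_le (fun x => !decide (x = c)) t
  simp only [List.filter_cons, List.length_cons, decide_not, ne_eq]
  simp only [decide_true, Bool.not_true, Bool.false_eq_true, if_false]
  omega

def solve_alt (arr : List String) (n : Int) : Int := solveAltLoop arr 0

-- ===== PRECONDITION & SPEC =====
-- Pre_ excludes lists containing a string whose length is not 1: Python's ord raises
-- TypeError there (in both A and B).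
def Pre_solve (arr : List String) (n : Int) : Prop :=
  (arr.all (fun s => s.toList.length == 1)) = true
instance (arr : List String) (n : Int) : Decidable (Pre_solve arr n) := by unfold Pre_solve; infer_instance
def pvWitness_solve : List String × Int := (["A", "B", "B", "c"], 4)
def Spec_solve (arr : List String) (n : Int) (out : Int) : Prop := out = solve_alt arr n
instance (arr : List String) (n : Int) (out : Int) : Decidable (Spec_solve arr n out) := by unfold Spec_solve; infer_instance

-- ===== CLAIM (what is proved, stated in full; the proofs are below) =====
def Claim_equal_solve : Prop := ∀ (arr : List String) (n : Int), Dom_solve arr n → Pre_solve arr n → Spec_solve arr n (solve arr n)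

-- ===== LEMMAS AND PROOFS =====

-- the common value both programs compute: the number of distinct elements of xs whose
-- multiplicity in xs meets the threshold ord - 64
def distinctMeet (xs : List String) : Int :=
  ((PySem.List.dedup xs).countP (fun k => decide (pyOrd k - 64 ≤ (xs.count k : Int))) : Int)

-- countP over a nodup list depends only on its set of members
theorem countP_eq_of_nodup_mem {α : Type} (p : α → Bool)
    (l₁ l₂ : List α) (h₁ : l₁.Nodup) (h₂ : l₂.Nodup) (hm : ∀ x, x ∈ l₁ ↔ x ∈ l₂) :
    l₁.countP p = l₂.countP p :=
  ((List.perm_ext_iff_of_nodup h₁ h₂).2 hm).countP_eq p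

-- the multiplicity of c is the length dropped by filtering c out
theorem count_add_length_filter (c : String) (l : List String) :
    l.count c + (l.filter (fun x => x ≠ c)).length = l.length := by
  induction l with
  | nil => simp
  | cons x t ih =>
    simp only [List.count_cons, List.filter_cons, List.length_cons, decide_not] at ih ⊢
    by_cases h : x = c <;> simp [h] <;> omega

-- one step of the partition-and-shrink loop, seen on distinctMeet
theorem distinctMeet_cons (c : String) (t : List String) :
    distinctMeet (c :: t) =
      (if ((c :: t).length : Int) - ((((c :: t).filter (fun x => x ≠ c)).length : Int)) ≥ pyOrd c - 64
       then 1 else 0) + distinctMeet ((c :: t).filter (fun x => x ≠ c)) := by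
  set new := (c :: t).filter (fun x => decide (x ≠ c)) with hnew
  have hcnotin : c ∉ PySem.List.dedup new := by
    intro h
    have := (PySem.List.mem_dedup new c).1 h
    rw [hnew] at this
    simp at this
  have h1 : (PySem.List.dedup (c :: t)).countP
        (fun k => decide (pyOrd k - 64 ≤ ((c :: t).count k : Int)))
      = (c :: PySem.List.dedup new).countP
        (fun k => decide (pyOrd k - 64 ≤ ((c :: t).count k : Int))) := by
    apply countP_eq_of_nodup_mem _ _ _ (PySem.List.nodup_dedup _)
      (List.nodup_cons.2 ⟨hcnotin, PySem.List.nodup_dedup _⟩)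
    intro x
    rw [PySem.List.mem_dedup]
    simp [hnew, List.mem_filter]
    by_cases hx : x = c <;> simp [hx]
  have h2 : (PySem.List.dedup new).countP
        (fun k => decide (pyOrd k - 64 ≤ ((c :: t).count k : Int)))
      = (PySem.List.dedup new).countP
        (fun k => decide (pyOrd k - 64 ≤ (new.count k : Int))) := by
    apply List.countP_congr
    intro x hx
    have hxnew : x ∈ new := (PySem.List.mem_dedup new x).1 hx
    have hxne : decide (x ≠ c) = true := (List.mem_filter.1 hxnew).2
    have : new.count x = (c :: t).count x := by
      rw [hnew]; exact List.count_filter hxne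
    simp [this]
  have hcount : ((c :: t).count c : Int) = ((c :: t).length : Int) - (new.length : Int) := by
    have := count_add_length_filter c (c :: t)
    rw [← hnew] at this
    omega
  unfold distinctMeet
  rw [h1, List.countP_cons, h2]
  have hcond : (decide (pyOrd c - 64 ≤ ((c :: t).count c : Int)) = true)
      ↔ (((c :: t).length : Int) - (new.length : Int) ≥ pyOrd c - 64) := by
    rw [hcount]; simp [ge_iff_le]
  split_ifs with ha hb hb
  · push_cast; ring
  · exact absurd (hcond.1 ha) hb
  · exact absurd (hcond.2 hb) ha
  · push_cast; ring

theorem solveAltLoop_eq (rest : List String) (cnt : Int) :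
    solveAltLoop rest cnt = cnt + distinctMeet rest := by
  induction rest, cnt using solveAltLoop.induct with
  | case1 cnt => simp [solveAltLoop, distinctMeet, PySem.List.dedup]
  | case2 cnt c t new ih =>
    rw [solveAltLoop]
    have hnew : List.filter (fun x => decide (x ≠ c)) (c :: t) = new := rfl
    rw [hnew]
    simp only [dite_eq_ite] at ih
    rw [ih, distinctMeet_cons c t, hnew]
    split_ifs <;> ring

theorem solve_eq_distinctMeet (arr : List String) (n : Int) :
    solve arr n = distinctMeet arr := by
  unfold solve
  rw [PySem.Dict.foldl_insert_getD_add_one_eq_counter]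
  simp only [PySem.Dict.items_counter, List.foldl_map]
  rw [PySem.List.foldl_congr_mem _ _
    (fun cnt k => if (fun k => decide (pyOrd k - 64 ≤ (arr.count k : Int))) k then cnt + 1 else cnt) _ ?_]
  · rw [PySem.List.foldl_if_add_one]
    simp [distinctMeet, PySem.List.dedup_eq_ofList]
  · intro acc k hk
    have hc : (PySem.Dict.counter arr).contains k = true := by
      rw [PySem.Dict.contains_counter]
      simpa using (PySem.Set.mem_ofList arr k).1 hk
    have hg : ((PySem.Dict.counter arr).get? k).getD 0 = (arr.count k : Int) := by
      have := PySem.Dict.getD_counter (xs := arr) (v := k)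
      simpa [PySem.Dict.getD] using this
    simp only [hc, hg, Bool.true_and]
    congr 1
    simp [ge_iff_le]
    constructor <;> intro h <;> omega

-- ===== VERDICT (by name: the statement is the Claim_ definition above) =====
theorem solve_spec : Claim_equal_solve := by
  intro arr n _ _
  show solve arr n = solve_alt arr n
  rw [solve_eq_distinctMeet arr n, solve_alt, solveAltLoop_eq, zero_add]
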